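-- pv_equiv track=rewrite | github.com/AbdallahxAhmed/mpv-config | deploy/detector.py | _looks_like_python_interpreter
-- ===== SOURCE A (Python) =====
-- def _looks_like_python_interpreter(py_base):
--     """
--     Return True when a shebang token looks like a Python executable name.
--
--     Intentionally accepts bare names (`python`, `python.exe`) and versioned
--     names (`python3`, `python3.12`, `python3.12.exe`).
--     """
--     if py_base.endswith(".exe"):
--         py_base = py_base[:-4]
--     if not py_base.startswith("python"):
--         return False
--     suffix = py_base[len("python"):]
--     if not suffix:
--         return True
--     if suffix[0] != "." and not suffix[0].isdigit():
--         return False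
--     return all(ch.isdigit() or ch == "." for ch in suffix)
-- ===== SOURCE B (Python) =====
-- def _looks_like_python_interpreter(py_base):
--     if py_base.endswith(".exe"):
--         py_base = py_base[:-4]
--     return py_base.rstrip("0123456789.") == "python"
-- ===== Notes on version B (the rewrite author's own statement) =====
-- stated objective: idiomatic
-- what changed: Replaces the prefix-check plus two-stage suffix scan (redundant first-char test then all()) with one right-to-left strip of version characters followed by a single equality test against the bare interpreter name.
import Mathlib
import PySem

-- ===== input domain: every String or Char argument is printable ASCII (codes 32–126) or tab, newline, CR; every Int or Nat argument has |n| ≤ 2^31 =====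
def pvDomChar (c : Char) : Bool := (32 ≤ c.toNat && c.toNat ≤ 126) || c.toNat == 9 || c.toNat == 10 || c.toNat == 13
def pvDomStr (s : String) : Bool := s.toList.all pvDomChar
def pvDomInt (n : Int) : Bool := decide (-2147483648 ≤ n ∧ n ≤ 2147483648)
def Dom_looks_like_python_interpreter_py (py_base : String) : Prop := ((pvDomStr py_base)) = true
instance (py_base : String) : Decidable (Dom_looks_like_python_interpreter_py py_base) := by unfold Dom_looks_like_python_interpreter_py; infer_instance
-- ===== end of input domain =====

-- B replaces A's prefix test plus two-stage suffix scan by one rstrip of version characters and an equality test (idiomatic).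

-- ===== PORT A =====
def looks_like_python_interpreter_py (py_base : String) : Bool :=
  let py_base := if PySem.Str.endswith py_base ".exe"
                 then PySem.Str.slice py_base none (some (-4)) else py_base
  if !(PySem.Str.startswith py_base "python") then false
  else
    let suffix := PySem.Str.slice py_base (some (PySem.Str.len "python" : Int)) none
    match suffix.toList with
    | [] => true
    | c :: _ =>
      if c != '.' && !(PySem.Chars.isdigit c) then false
      else suffix.toList.all (fun ch => PySem.Chars.isdigit ch || ch == '.')

-- ===== PORT B =====
-- str.rstrip("0123456789.") ported by hand (PySem has no one-sided strip with a chars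
-- argument): drop trailing characters that occur in the chars string — exact here, since
-- every character of "0123456789." is plain ASCII.
def pyRstripDigitsDot (s : String) : String :=
  String.ofList ((s.toList.reverse.dropWhile (fun c => c ∈ "0123456789.".toList)).reverse)

def looks_like_python_interpreter_py_alt (py_base : String) : Bool :=
  let py_base := if PySem.Str.endswith py_base ".exe"
                 then PySem.Str.slice py_base none (some (-4)) else py_base
  pyRstripDigitsDot py_base == "python"

-- ===== PRECONDITION & SPEC =====
def Spec_looks_like_python_interpreter_py (py_base : String) (out : Bool) : Prop := out = looks_like_python_interpreter_py_alt py_base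
instance (py_base : String) (out : Bool) : Decidable (Spec_looks_like_python_interpreter_py py_base out) := by unfold Spec_looks_like_python_interpreter_py; infer_instance

-- ===== CLAIM (what is proved, stated in full; the proofs are below) =====
def Claim_equal_looks_like_python_interpreter_py : Prop := ∀ (py_base : String), Dom_looks_like_python_interpreter_py py_base → Spec_looks_like_python_interpreter_py py_base (looks_like_python_interpreter_py py_base)

-- ===== LEMMAS AND PROOFS =====

-- B's char-class membership agrees with A's "digit or dot" test, character by character.
theorem pv_class_eq (c : Char) :
    (decide (c ∈ "0123456789.".toList)) = (PySem.Chars.isdigit c || c == '.') := by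
  have hmem : (c ∈ "0123456789.".toList) ↔ (('0' ≤ c ∧ c ≤ '9') ∨ c = '.') := by
    have h1 : "0123456789.".toList = ['0','1','2','3','4','5','6','7','8','9','.'] := rfl
    rw [h1]
    constructor
    · intro h; fin_cases h <;> simp
    · rintro (⟨ha, hb⟩ | rfl)
      · rw [Char.le_def, UInt32.le_iff_toNat_le] at ha hb
        obtain ⟨n, hn⟩ : ∃ n, c.toNat = n := ⟨_, rfl⟩
        have hc : c = Char.ofNat n := hn ▸ (Char.ofNat_toNat c).symm
        have ha' : 48 ≤ n := hn ▸ ha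
        have hb' : n ≤ 57 := hn ▸ hb
        subst hc
        interval_cases n <;> simp
      · simp
  rw [Bool.eq_iff_iff, decide_eq_true_eq, hmem]
  simp [PySem.Chars.isdigit]

-- Characterisation of B's rstrip in terms of prefix plus suffix scan.
theorem pv_rstrip_iff (q : Char → Bool) (hn : q 'n' = false) (L : List Char) :
    (L.reverse.dropWhile q).reverse = "python".toList ↔
      ("python".toList <+: L ∧ ∀ x ∈ L.drop 6, q x = true) := by
  have hrd : (L.reverse.dropWhile q).reverse = L.rdropWhile q := rfl
  rw [hrd]
  constructor
  · intro h
    have hsplit : L.rdropWhile q ++ L.rtakeWhile q = L := List.rdropWhile_append_rtakeWhile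
    rw [h] at hsplit
    refine ⟨⟨_, hsplit⟩, ?_⟩
    have hd : L.drop 6 = L.rtakeWhile q := by
      conv_lhs => rw [← hsplit]
      exact List.drop_left' (by decide)
    intro x hx
    exact List.mem_rtakeWhile_imp (hd ▸ hx)
  · rintro ⟨⟨t, ht⟩, hall⟩
    have hd : L.drop 6 = t := by rw [← ht]; exact List.drop_left' (by decide)
    rw [hd] at hall
    conv_lhs => rw [← ht]
    show ((("python".toList ++ t).reverse).dropWhile q).reverse = "python".toList
    rw [List.reverse_append, List.dropWhile_append]
    have htrev : t.reverse.dropWhile q = [] := by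
      rw [List.dropWhile_eq_nil_iff]
      intro x hx; exact hall x (List.mem_reverse.mp hx)
    rw [htrev]
    simp only [List.isEmpty_nil, if_true]
    have hpy : ("python".toList.reverse).dropWhile q = "python".toList.reverse := by
      rw [List.dropWhile_eq_self_iff]
      intro h; simpa using hn
    rw [hpy, List.reverse_reverse]

-- The core equivalence, for any string (the ".exe" strip is identical in both ports).
theorem pv_body_eq (t : String) :
    (if !(PySem.Str.startswith t "python") then false
     else
       let suffix := PySem.Str.slice t (some (PySem.Str.len "python" : Int)) none
       match suffix.toList with
       | [] => true
       | c :: _ =>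
         if c != '.' && !(PySem.Chars.isdigit c) then false
         else suffix.toList.all (fun ch => PySem.Chars.isdigit ch || ch == '.'))
    = (pyRstripDigitsDot t == "python") := by
  have hrhs : (pyRstripDigitsDot t == "python")
      = decide ((t.toList.reverse.dropWhile (fun c => c ∈ "0123456789.".toList)).reverse
          = "python".toList) := by
    rw [Bool.eq_iff_iff]
    simp only [beq_iff_eq, decide_eq_true_eq, pyRstripDigitsDot]
    constructor
    · intro h; rw [← h]; simp
    · intro h; rw [h]; simp
  have hchar := pv_rstrip_iff (fun c => decide (c ∈ "0123456789.".toList)) (by decide) t.toList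
  have hsuffix : (PySem.Str.slice t (some (PySem.Str.len "python" : Int)) none).toList
      = t.toList.drop 6 := by
    have h6 : (PySem.Str.len "python" : Int) = (6 : Int) := by decide
    rw [h6]
    simp only [PySem.Str.slice, String.toList_ofList, PySem.Chars.slice_eq_listSlice]
    rw [PySem.List.slice_from _ (by norm_num : (0:Int) ≤ 6)]
    rfl
  by_cases hpre : "python".toList <+: t.toList
  · have hstart : PySem.Str.startswith t "python" = true := by
      unfold PySem.Str.startswith
      exact (PySem.Chars.startswith_iff _ _).mpr hpre
    rw [hstart]
    simp only [Bool.not_true, Bool.false_eq_true, if_false]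
    rw [hrhs, Bool.eq_iff_iff, decide_eq_true_eq, hchar]
    simp only [hsuffix]
    rcases hd : t.toList.drop 6 with _ | ⟨c, r⟩
    · exact iff_of_true rfl ⟨hpre, by simp⟩
    · simp only []
      by_cases hcnd : (c != '.' && !(PySem.Chars.isdigit c)) = true
      · rw [if_pos hcnd]
        simp only [Bool.false_eq_true, false_iff, not_and]
        intro _ hall
        have hmem := hall c (List.mem_cons_self ..)
        rw [pv_class_eq c] at hmem
        simp only [Bool.and_eq_true, bne_iff_ne, Bool.not_eq_true'] at hcnd
        rcases Bool.or_eq_true .. |>.mp hmem with hdig | hdot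
        · exact absurd hdig (by simp [hcnd.2])
        · exact absurd (by simpa using hdot) hcnd.1
      · rw [if_neg hcnd]
        rw [Bool.eq_iff_iff]
        simp only [List.all_eq_true, iff_true]
        constructor
        · intro hall
          exact ⟨hpre, fun x hx => by rw [pv_class_eq x]; exact hall x hx⟩
        · rintro ⟨-, hall⟩ x hx
          rw [← pv_class_eq x]; exact hall x hx
  · have hstart : PySem.Str.startswith t "python" = false := by
      unfold PySem.Str.startswith
      rw [Bool.eq_false_iff]
      intro h; exact hpre ((PySem.Chars.startswith_iff _ _).mp h)
    rw [hstart]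
    simp only [Bool.not_false, if_true]
    rw [hrhs]
    symm
    rw [decide_eq_false_iff_not]
    intro h
    exact hpre (hchar.mp h).1

-- ===== VERDICT (by name: the statement is the Claim_ definition above) =====
theorem looks_like_python_interpreter_py_spec : Claim_equal_looks_like_python_interpreter_py := by
  intro py_base _
  show looks_like_python_interpreter_py py_base = looks_like_python_interpreter_py_alt py_base
  simp only [looks_like_python_interpreter_py, looks_like_python_interpreter_py_alt]
  generalize (if PySem.Str.endswith py_base ".exe" then PySem.Str.slice py_base none (some (-4)) else py_base) = t
  exact pv_body_eq t
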